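-- pv_equiv track=rewrite | github.com/onaeonae1/ProblemSolving | Programmers/불량사용자.py | solution
-- ===== SOURCE A (Python) =====
-- from itertools import product
--
-- def check(str1, str2):
--     is_valid = True
--     if len(str1) != len(str2):
--         return False
--
--     for u, b in list(zip(str1,str2)):
--         if b!="*" and u!=b:
--             return False
--
--     return is_valid
--
-- def solution(user_id, banned_id):
--     answer = 0
--     temp = [[] for _ in range(len(banned_id))] # ban 하나 당 가능한 애들을 몰빵
--     res = set()
--     for idx, ban in enumerate(banned_id):
--         for usr in user_id:
--             is_valid = check(usr, ban)
--             if is_valid: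
--                 temp[idx].append(usr)
--
--     # 각 ban 당 가능한 애들 뽑아둔거를 다 join
--     for item in list(product(*temp)):
--         item_set = set(item)
--         if len(item_set) == len(banned_id):
--             res.add("".join(sorted(item_set))) # 정렬 안해주면 틀린다
--
--     answer = len(res)
--     return answer
-- ===== SOURCE B (Python) =====
-- def solution(user_id, banned_id):
--     keys = set()
--     n = len(banned_id)
--
--     def go(i, chosen):
--         if i == n:
--             keys.add("".join(sorted(chosen)))
--             return
--         pat = banned_id[i]
--         for u in user_id:
--             if len(u) == len(pat) and all(p == "*" or c == p for c, p in zip(u, pat)) and u not in chosen: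
--                 go(i + 1, chosen + [u])
--
--     go(0, [])
--     return len(keys)
-- ===== Notes on version B (the rewrite author's own statement) =====
-- stated objective: faster
-- what changed: Replaces the full cartesian product over per-pattern candidate lists with recursive backtracking that extends only duplicate-free assignments, pruning any branch that reuses a user.
import Mathlib
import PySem

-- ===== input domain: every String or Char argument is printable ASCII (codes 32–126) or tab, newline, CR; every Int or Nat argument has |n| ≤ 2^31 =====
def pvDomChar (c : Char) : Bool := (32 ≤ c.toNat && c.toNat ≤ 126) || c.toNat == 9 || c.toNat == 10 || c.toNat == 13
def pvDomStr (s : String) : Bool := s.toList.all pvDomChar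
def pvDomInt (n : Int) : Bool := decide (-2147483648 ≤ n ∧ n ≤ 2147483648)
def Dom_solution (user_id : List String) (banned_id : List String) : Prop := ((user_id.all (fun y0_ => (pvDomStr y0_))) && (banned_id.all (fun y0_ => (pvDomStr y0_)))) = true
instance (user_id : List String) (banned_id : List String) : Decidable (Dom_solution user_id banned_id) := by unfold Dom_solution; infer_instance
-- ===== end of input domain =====

-- B replaces A's full cartesian product over per-pattern candidate lists by recursive
-- backtracking that only extends duplicate-free assignments (objective: faster).

-- ===== PORT A =====
-- check(str1, str2)
def checkA (str1 str2 : String) : Bool :=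
  if str1.toList.length ≠ str2.toList.length then false
  else (str1.toList.zip str2.toList).all (fun ub => ub.2 == '*' || ub.1 == ub.2)

-- itertools.product(*ls), leftmost factor varying slowest
def pyProductA : List (List String) → List (List String)
  | [] => [[]]
  | xs :: rest => xs.flatMap (fun x => (pyProductA rest).map (fun t => x :: t))

def solution (user_id : List String) (banned_id : List String) : Int :=
  let temp := banned_id.map (fun ban =>
    user_id.foldl (fun acc usr => if checkA usr ban then acc ++ [usr] else acc) [])
  let res := (pyProductA temp).foldl (fun res item =>
    let itemSet : PySem.Set String := PySem.Set.ofList item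
    if itemSet.length == banned_id.length then
      PySem.Set.add res (PySem.Str.join "" (PySem.List.sorted itemSet (fun x => x) false))
    else res) PySem.Set.empty
  (res.length : Int)

-- ===== PORT B =====
def matchB (u pat : String) : Bool :=
  u.toList.length == pat.toList.length &&
    (u.toList.zip pat.toList).all (fun cp => cp.2 == '*' || cp.1 == cp.2)

-- go(i, chosen): recursion over the remaining patterns, extending chosen by unused matching users
def goB (user_id : List String) : List String → List String → PySem.Set String → PySem.Set String
  | [], chosen, keys => PySem.Set.add keys (PySem.Str.join "" (PySem.List.sorted chosen (fun x => x) false))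
  | pat :: rest, chosen, keys =>
      user_id.foldl (fun ks u =>
        if matchB u pat && !(chosen.contains u) then goB user_id rest (chosen ++ [u]) ks else ks) keys
  termination_by bans => bans.length

def solution_alt (user_id : List String) (banned_id : List String) : Int :=
  (goB user_id banned_id [] PySem.Set.empty).length

-- ===== PRECONDITION & SPEC =====
def Spec_solution (user_id : List String) (banned_id : List String) (out : Int) : Prop := out = solution_alt user_id banned_id
instance (user_id : List String) (banned_id : List String) (out : Int) : Decidable (Spec_solution user_id banned_id out) := by unfold Spec_solution; infer_instance

-- ===== CLAIM (what is proved, stated in full; the proofs are below) =====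
def Claim_equal_solution : Prop := ∀ (user_id : List String) (banned_id : List String), Dom_solution user_id banned_id → Spec_solution user_id banned_id (solution user_id banned_id)

-- ===== LEMMAS AND PROOFS =====

-- the canonical key both programs collect: "".join(sorted(l))
def keyOf (l : List String) : String := PySem.Str.join "" (PySem.List.sorted l (fun x => x) false)

-- a valid extension of `chosen` for the remaining patterns `bans`
def ValidExt (U bans ext chosen : List String) : Prop :=
  List.Forall₂ (fun u p => matchB u p = true) ext bans ∧ (∀ u ∈ ext, u ∈ U) ∧
    ext.Nodup ∧ (∀ u ∈ ext, u ∉ chosen)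

theorem checkA_eq_matchB (u p : String) : checkA u p = matchB u p := by
  unfold checkA matchB
  cases hb : (u.toList.length == p.toList.length) with
  | false =>
    have h : u.toList.length ≠ p.toList.length := by simpa using hb
    rw [if_pos h]
    simp
  | true =>
    have h : u.toList.length = p.toList.length := by simpa using hb
    rw [if_neg (not_not_intro h)]
    simp

theorem mem_pyProductA (ls : List (List String)) (item : List String) :
    item ∈ pyProductA ls ↔ List.Forall₂ (fun u xs => u ∈ xs) item ls := by
  induction ls generalizing item with
  | nil =>
    simp [pyProductA]
  | cons xs rest ih =>
    simp only [pyProductA, List.mem_flatMap, List.mem_map]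
    constructor
    · rintro ⟨x, hx, t, ht, rfl⟩
      exact List.Forall₂.cons hx ((ih t).mp ht)
    · intro h
      cases h with
      | cons hx ht => exact ⟨_, hx, _, (ih _).mpr ht, rfl⟩

theorem mem_foldl_acc {α β : Type} (l : List α) (f : List β → α → List β) (Q : α → β → Prop)
    (hf : ∀ s x k, k ∈ f s x ↔ k ∈ s ∨ Q x k) (init : List β) (k : β) :
    k ∈ l.foldl f init ↔ k ∈ init ∨ ∃ x ∈ l, Q x k := by
  induction l generalizing init with
  | nil => simp
  | cons a t ih =>
    rw [List.foldl_cons, ih, hf init a]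
    simp [or_assoc]

theorem nodup_foldl_acc {α β : Type} (l : List α) (f : List β → α → List β)
    (hf : ∀ s x, s.Nodup → (f s x).Nodup) (init : List β) (h : init.Nodup) :
    (l.foldl f init).Nodup := by
  induction l generalizing init with
  | nil => exact h
  | cons a t ih => exact ih _ (hf _ _ h)

theorem ofList_sublist (xs : List String) : List.Sublist (PySem.Set.ofList xs) xs := by
  induction xs with
  | nil => simp [PySem.Set.ofList_nil]
  | cons x xs ih =>
    rw [PySem.Set.ofList_cons]
    refine List.Sublist.cons₂ x ?_
    unfold PySem.Set.discard
    exact List.Sublist.trans List.filter_sublist ih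

theorem ofList_length_eq_iff (xs : List String) :
    (PySem.Set.ofList xs).length = xs.length ↔ xs.Nodup := by
  constructor
  · intro h
    have he := (ofList_sublist xs).eq_of_length h
    rw [← he]
    exact PySem.Set.nodup_ofList xs
  · intro h
    rw [PySem.Set.ofList_eq_self_of_nodup xs h]

theorem forall2_mem_left {α β : Type} {r : α → β → Prop} {as : List α} {bs : List β}
    (h : List.Forall₂ r as bs) : ∀ a ∈ as, ∃ b ∈ bs, r a b := by
  induction h with
  | nil => simp
  | cons hr _ ih =>
    intro a ha
    rcases List.mem_cons.mp ha with rfl | ha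
    · exact ⟨_, List.mem_cons_self, hr⟩
    · obtain ⟨b, hb, hrb⟩ := ih a ha
      exact ⟨b, List.mem_cons_of_mem _ hb, hrb⟩

theorem forall2_strengthen {α β : Type} {r : α → β → Prop} {P : α → Prop}
    {as : List α} {bs : List β} (h : List.Forall₂ r as bs) (hP : ∀ a ∈ as, P a) :
    List.Forall₂ (fun a b => P a ∧ r a b) as bs := by
  induction h with
  | nil => exact List.Forall₂.nil
  | cons hr _ ih =>
    exact List.Forall₂.cons ⟨hP _ List.mem_cons_self, hr⟩
      (ih (fun a ha => hP a (List.mem_cons_of_mem _ ha)))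

theorem mem_goB (U : List String) (bans : List String) :
    ∀ (chosen : List String) (keys : PySem.Set String) (k : String),
      k ∈ goB U bans chosen keys ↔
        k ∈ keys ∨ ∃ ext, ValidExt U bans ext chosen ∧ k = keyOf (chosen ++ ext) := by
  induction bans with
  | nil =>
    intro chosen keys k
    rw [goB, PySem.Set.mem_add]
    constructor
    · rintro (h | h)
      · exact Or.inl h
      · exact Or.inr ⟨[], ⟨List.Forall₂.nil, by simp, List.nodup_nil, by simp⟩,
          by simpa [keyOf] using h⟩
    · rintro (h | ⟨ext, ⟨hF, _, _, _⟩, hk⟩)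
      · exact Or.inl h
      · cases hF
        exact Or.inr (by simpa [keyOf] using hk)
  | cons pat rest ih =>
    intro chosen keys k
    rw [goB]
    rw [mem_foldl_acc _ _
      (fun u k => (matchB u pat && !(chosen.contains u)) = true ∧
        ∃ ext, ValidExt U rest ext (chosen ++ [u]) ∧ k = keyOf ((chosen ++ [u]) ++ ext))
      (by
        intro s u k'
        by_cases hc : (matchB u pat && !(chosen.contains u)) = true
        · rw [if_pos hc, ih (chosen ++ [u]) s k']
          have h1 : matchB u pat = true ∧ u ∉ chosen := by simpa using hc
          simp [h1]
        · rw [if_neg hc]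
          have h1 : ¬(matchB u pat = true ∧ u ∉ chosen) := by simpa using hc
          simp only [iff_self_or]
          rintro ⟨hq, -⟩
          exact absurd (by simpa using hq) h1)]
    constructor
    · rintro (h | ⟨u, hu, hc, ext, ⟨hF, hU, hN, hD⟩, hk⟩)
      · exact Or.inl h
      · have hc1 : matchB u pat = true := (Bool.and_eq_true_iff.mp hc).1
        have hc2 : u ∉ chosen := by
          have := (Bool.and_eq_true_iff.mp hc).2
          simpa using this
        refine Or.inr ⟨u :: ext, ⟨List.Forall₂.cons hc1 hF, ?_, ?_, ?_⟩, ?_⟩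
        · intro v hv
          rcases List.mem_cons.mp hv with rfl | hv
          · exact hu
          · exact hU v hv
        · refine List.nodup_cons.mpr ⟨?_, hN⟩
          intro hmem
          exact hD u hmem (by simp)
        · intro v hv
          rcases List.mem_cons.mp hv with rfl | hv
          · exact hc2
          · intro hvc
            exact hD v hv (List.mem_append_left _ hvc)
        · rw [hk]
          congr 1
          simp
    · rintro (h | ⟨ext, ⟨hF, hU, hN, hD⟩, hk⟩)
      · exact Or.inl h
      · cases ext with
        | nil => cases hF
        | cons u ext' =>
          cases hF with
          | cons hm hF' =>
            have huU : u ∈ U := hU u List.mem_cons_self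
            have hune : u ∉ ext' := (List.nodup_cons.mp hN).1
            have huc : u ∉ chosen := hD u List.mem_cons_self
            refine Or.inr ⟨u, huU, ?_, ext', ⟨hF', ?_, (List.nodup_cons.mp hN).2, ?_⟩, ?_⟩
            · simp [hm, huc]
            · intro v hv
              exact hU v (List.mem_cons_of_mem _ hv)
            · intro v hv
              simp only [List.mem_append, List.mem_singleton]
              rintro (hvc | rfl)
              · exact hD v (List.mem_cons_of_mem _ hv) hvc
              · exact hune hv
            · rw [hk]
              congr 1
              simp

theorem nodup_goB (U : List String) (bans : List String) :
    ∀ (chosen : List String) (keys : PySem.Set String), keys.Nodup → (goB U bans chosen keys).Nodup := by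
  induction bans with
  | nil =>
    intro chosen keys h
    rw [goB]
    exact PySem.Set.nodup_add _ _ h
  | cons pat rest ih =>
    intro chosen keys h
    rw [goB]
    refine nodup_foldl_acc _ _ ?_ _ h
    intro s u hs
    split
    · exact ih _ _ hs
    · exact hs

theorem fold_filter_eq (U : List String) (ban : String) :
    (U.foldl (fun acc usr => if checkA usr ban then acc ++ [usr] else acc) []) =
      U.filter (fun usr => checkA usr ban) := by
  rw [PySem.List.foldl_append_if_eq_filter]
  simp

-- membership in A's result set (with the `let` of the loop body written out)
theorem mem_resA (U banned : List String) (k : String) :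
    (k ∈ (pyProductA (banned.map (fun ban =>
        U.foldl (fun acc usr => if checkA usr ban then acc ++ [usr] else acc) []))).foldl
      (fun res item =>
        if (PySem.Set.ofList item).length == banned.length then
          PySem.Set.add res (PySem.Str.join "" (PySem.List.sorted (PySem.Set.ofList item) (fun x => x) false))
        else res) PySem.Set.empty) ↔
    ∃ item, List.Forall₂ (fun u b => u ∈ U ∧ checkA u b = true) item banned ∧
      (PySem.Set.ofList item).length = banned.length ∧ k = keyOf (PySem.Set.ofList item) := by
  rw [mem_foldl_acc _ _
    (fun item k => (PySem.Set.ofList item).length = banned.length ∧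
      k = keyOf (PySem.Set.ofList item))
    (by
      intro s item k'
      by_cases hc : (PySem.Set.ofList item).length = banned.length
      · have hb : ((PySem.Set.ofList item).length == banned.length) = true := by simpa using hc
        rw [if_pos hb, PySem.Set.mem_add]
        simp [hc, keyOf]
      · have hb : ((PySem.Set.ofList item).length == banned.length) = false := by simpa using hc
        rw [if_neg (by simp [hb])]
        simp [hc])]
  have hempty : (PySem.Set.empty : PySem.Set String) = [] := rfl
  rw [hempty]
  simp only [List.not_mem_nil, false_or]
  constructor
  · rintro ⟨item, hmem, hQ⟩
    refine ⟨item, ?_, hQ⟩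
    have h2 := (mem_pyProductA _ _).mp hmem
    rw [List.forall₂_map_right_iff] at h2
    refine h2.imp ?_
    intro u b hub
    rw [fold_filter_eq] at hub
    have := List.mem_filter.mp hub
    exact ⟨this.1, this.2⟩
  · rintro ⟨item, hF, hQ⟩
    refine ⟨item, ?_, hQ⟩
    rw [mem_pyProductA, List.forall₂_map_right_iff]
    refine hF.imp ?_
    intro u b hub
    rw [fold_filter_eq]
    exact List.mem_filter.mpr ⟨hub.1, hub.2⟩

theorem nodup_resA (U banned : List String) :
    ((pyProductA (banned.map (fun ban =>
        U.foldl (fun acc usr => if checkA usr ban then acc ++ [usr] else acc) []))).foldl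
      (fun res item =>
        if (PySem.Set.ofList item).length == banned.length then
          PySem.Set.add res (PySem.Str.join "" (PySem.List.sorted (PySem.Set.ofList item) (fun x => x) false))
        else res) PySem.Set.empty).Nodup := by
  refine nodup_foldl_acc _ _ ?_ _ List.nodup_nil
  intro s item hs
  split
  · exact PySem.Set.nodup_add _ _ hs
  · exact hs

-- the two collected key sets have the same members
theorem mem_iff_AB (U banned : List String) (k : String) :
    (∃ item, List.Forall₂ (fun u b => u ∈ U ∧ checkA u b = true) item banned ∧
      (PySem.Set.ofList item).length = banned.length ∧ k = keyOf (PySem.Set.ofList item)) ↔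
    (∃ ext, ValidExt U banned ext [] ∧ k = keyOf ([] ++ ext)) := by
  constructor
  · rintro ⟨item, hF, hlen, hk⟩
    have hlen2 : item.length = banned.length := hF.length_eq
    have hnd : item.Nodup := (ofList_length_eq_iff item).mp (by rw [hlen, hlen2])
    have hself : PySem.Set.ofList item = item := PySem.Set.ofList_eq_self_of_nodup item hnd
    refine ⟨item, ⟨?_, ?_, hnd, by simp⟩, ?_⟩
    · refine hF.imp ?_
      intro u b hub
      rw [← checkA_eq_matchB]
      exact hub.2
    · intro u hu
      obtain ⟨b, _, hub⟩ := forall2_mem_left hF u hu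
      exact hub.1
    · rw [hk, hself]
      simp
  · rintro ⟨ext, ⟨hF, hU, hN, _⟩, hk⟩
    have hself : PySem.Set.ofList ext = ext := PySem.Set.ofList_eq_self_of_nodup ext hN
    refine ⟨ext, ?_, ?_, ?_⟩
    · refine (forall2_strengthen hF hU).imp ?_
      intro u b hub
      rw [checkA_eq_matchB]
      exact ⟨hub.1, hub.2⟩
    · rw [hself]
      exact hF.length_eq
    · rw [hk, hself]
      simp

-- ===== VERDICT (by name: the statement is the Claim_ definition above) =====
theorem solution_spec : Claim_equal_solution := by
  intro U banned _
  unfold Spec_solution solution solution_alt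
  have hmem : ∀ k, (k ∈ (pyProductA (banned.map (fun ban =>
        U.foldl (fun acc usr => if checkA usr ban then acc ++ [usr] else acc) []))).foldl
      (fun res item =>
        if (PySem.Set.ofList item).length == banned.length then
          PySem.Set.add res (PySem.Str.join "" (PySem.List.sorted (PySem.Set.ofList item) (fun x => x) false))
        else res) PySem.Set.empty) ↔ k ∈ goB U banned [] PySem.Set.empty := by
    intro k
    rw [mem_resA U banned k, mem_goB U banned [] PySem.Set.empty k]
    have hempty : (PySem.Set.empty : PySem.Set String) = [] := rfl
    rw [hempty]
    simp only [List.not_mem_nil, false_or]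
    exact mem_iff_AB U banned k
  have hperm := (List.perm_ext_iff_of_nodup (nodup_resA U banned)
    (nodup_goB U banned [] PySem.Set.empty List.nodup_nil)).mpr hmem
  exact congrArg (fun n : Nat => (n : Int)) hperm.length_eq
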